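-- pv_equiv track=rewrite | github.com/pypi-data/pypi-mirror-350 | packages/oresat-configs/oresat_configs-1.0.0-py3-none-any.whl/oresat_configs/scripts/gen_cand_manager.py | _join_fmts
-- ===== SOURCE A (Python) =====
-- DYN_STR_FMT = "w"
--
-- DYN_BYTES_FMT = "y"
--
-- def _join_fmts(fmts: list[str]) -> list[str]:
--     new_fmts = []
--     tmp = ""
--     for fmt in fmts:
--         if fmt in [DYN_BYTES_FMT, DYN_STR_FMT]:
--             if tmp:
--                 new_fmts.append(tmp)
--                 tmp = ""
--             new_fmts.append(fmt)
--         else: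
--             tmp += fmt
--     if tmp:
--         new_fmts.append(tmp)
--     return new_fmts
-- ===== SOURCE B (Python) =====
-- DYN_STR_FMT = "w"
--
-- DYN_BYTES_FMT = "y"
--
-- def _join_fmts(fmts: list[str]) -> list[str]:
--     dyn = (DYN_BYTES_FMT, DYN_STR_FMT)
--     out = []
--     i = 0
--     n = len(fmts)
--     while i < n:
--         if fmts[i] in dyn:
--             out.append(fmts[i])
--             i += 1
--         else:
--             j = i
--             while j < n and fmts[j] not in dyn:
--                 j += 1
--             run = "".join(fmts[i:j])
--             if run:
--                 out.append(run)
--             i = j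
--     return out
-- ===== Notes on version B (the rewrite author's own statement) =====
-- stated objective: alternative
-- what changed: Replaces A's running-accumulator-with-flush fold by a span-based scan: B locates each maximal run of non-dynamic formats with an inner boundary scan, joins the whole run at once, and appends it only if non-empty.
import Mathlib
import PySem

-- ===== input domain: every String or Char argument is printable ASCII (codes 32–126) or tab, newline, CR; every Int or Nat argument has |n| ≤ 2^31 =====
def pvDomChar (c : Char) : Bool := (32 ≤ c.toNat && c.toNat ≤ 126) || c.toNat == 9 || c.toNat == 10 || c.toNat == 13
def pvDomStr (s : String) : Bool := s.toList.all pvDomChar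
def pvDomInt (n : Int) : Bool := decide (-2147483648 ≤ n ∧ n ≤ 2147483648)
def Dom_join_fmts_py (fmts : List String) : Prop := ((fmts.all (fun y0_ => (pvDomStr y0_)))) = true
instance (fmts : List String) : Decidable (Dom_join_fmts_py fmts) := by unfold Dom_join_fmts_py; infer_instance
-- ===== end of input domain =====

-- B replaces A's running-accumulator-with-flush loop by a span-based scan that joins each
-- maximal non-dynamic run at once (objective: alternative decomposition, same cost).


-- ===== PORT A =====
-- for fmt in fmts: … with state (new_fmts, tmp); final flush of tmp
def join_fmts_py (fmts : List String) : List String :=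
  let s := fmts.foldl (fun (s : List String × String) fmt =>
    if fmt = "y" ∨ fmt = "w" then
      let acc := if s.2 ≠ "" then s.1 ++ [s.2] else s.1
      (acc ++ [fmt], "")
    else
      (s.1, s.2 ++ fmt)) ([], "")
  if s.2 ≠ "" then s.1 ++ [s.2] else s.1

-- ===== PORT B =====
def isDynFmt (fmt : String) : Bool := fmt = "y" ∨ fmt = "w"

-- "".join of a list of strings
def strJoin (l : List String) : String := l.foldr (· ++ ·) ""

-- B's outer while-loop: at a dynamic format emit it and advance by one; otherwise scan the
-- maximal non-dynamic run (takeWhile/dropWhile = the inner j-scan plus slice), join it,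
-- and emit the joined run iff it is non-empty.
def join_fmts_py_alt (fmts : List String) : List String :=
  match fmts with
  | [] => []
  | f :: rest =>
    if isDynFmt f then f :: join_fmts_py_alt rest
    else
      let run := (f :: rest).takeWhile (fun x => !isDynFmt x)
      let rest' := (f :: rest).dropWhile (fun x => !isDynFmt x)
      let j := strJoin run
      (if j = "" then [] else [j]) ++ join_fmts_py_alt rest'
termination_by fmts.length
decreasing_by
  · simp
  · simp [*]
    exact List.length_dropWhile_le _ rest

-- ===== PRECONDITION & SPEC =====
def Spec_join_fmts_py (fmts : List String) (out : List String) : Prop := out = join_fmts_py_alt fmts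
instance (fmts : List String) (out : List String) : Decidable (Spec_join_fmts_py fmts out) := by unfold Spec_join_fmts_py; infer_instance

-- ===== CLAIM (what is proved, stated in full; the proofs are below) =====
def Claim_equal_join_fmts_py : Prop := ∀ (fmts : List String), Dom_join_fmts_py fmts → Spec_join_fmts_py fmts (join_fmts_py fmts)

-- ===== LEMMAS AND PROOFS =====

-- A's loop with a pending run `tmp`, written as structural recursion (bridge between the two ports).
def aRun (tmp : String) : List String → List String
  | [] => if tmp ≠ "" then [tmp] else []
  | f :: rest =>
    if f = "y" ∨ f = "w" then
      (if tmp ≠ "" then [tmp] else []) ++ f :: aRun "" rest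
    else
      aRun (tmp ++ f) rest

-- A's fold (plus final flush) equals the recursive description, for any starting state.
theorem foldl_eq_aRun (fmts : List String) : ∀ (acc : List String) (tmp : String),
    (let s := fmts.foldl (fun (s : List String × String) fmt =>
      if fmt = "y" ∨ fmt = "w" then
        ((if s.2 ≠ "" then s.1 ++ [s.2] else s.1) ++ [fmt], "")
      else
        (s.1, s.2 ++ fmt)) (acc, tmp)
     if s.2 ≠ "" then s.1 ++ [s.2] else s.1) = acc ++ aRun tmp fmts := by
  induction fmts with
  | nil => intro acc tmp; simp only [List.foldl_nil, aRun]; split <;> simp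
  | cons f rest ih =>
    intro acc tmp
    simp only [List.foldl_cons, aRun]
    by_cases hf : f = "y" ∨ f = "w"
    · simp only [hf, if_pos]
      rw [ih]
      by_cases ht : tmp = "" <;> simp [ht]
    · simp only [hf, if_neg, not_false_iff]
      rw [ih]

-- a non-empty dropWhile result starts with an element failing the predicate
theorem head_dropWhile_dyn (l : List String) (d : String) (r : List String)
    (h : l.dropWhile (fun x => !isDynFmt x) = d :: r) : isDynFmt d = true := by
  induction l with
  | nil => simp at h
  | cons g l' ih =>
    rw [List.dropWhile_cons] at h
    by_cases hg : isDynFmt g = true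
    · simp only [hg, Bool.not_true, Bool.false_eq_true, if_false, List.cons.injEq] at h
      exact h.1 ▸ hg
    · have hg' : isDynFmt g = false := Bool.eq_false_iff.mpr hg
      rw [hg'] at h
      exact ih (by simpa using h)

-- B applied to the dropWhile suffix steps once through its (dynamic) head.
theorem alt_dropWhile (l : List String) :
    join_fmts_py_alt (l.dropWhile (fun x => !isDynFmt x)) =
      (match l.dropWhile (fun x => !isDynFmt x) with
       | [] => []
       | d :: r => d :: join_fmts_py_alt r) := by
  cases h : l.dropWhile (fun x => !isDynFmt x) with
  | nil => simp [join_fmts_py_alt]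
  | cons d r => simp [join_fmts_py_alt, head_dropWhile_dyn l d r h]

-- B unrolled into its span form.
theorem alt_eq_span (fmts : List String) :
    join_fmts_py_alt fmts =
      (if strJoin (fmts.takeWhile (fun x => !isDynFmt x)) = "" then []
       else [strJoin (fmts.takeWhile (fun x => !isDynFmt x))]) ++
        (match fmts.dropWhile (fun x => !isDynFmt x) with
         | [] => []
         | d :: r => d :: join_fmts_py_alt r) := by
  cases fmts with
  | nil => simp [join_fmts_py_alt, strJoin]
  | cons f rest =>
    by_cases hf : isDynFmt f = true
    · simp [join_fmts_py_alt, hf, strJoin]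
    · rw [join_fmts_py_alt]
      simp only [hf, Bool.false_eq_true, if_false, List.takeWhile_cons, List.dropWhile_cons,
        Bool.not_false, if_true]
      rw [alt_dropWhile rest]

theorem strJoin_nil : strJoin [] = "" := rfl

-- the recursive description with pending `tmp` equals B's span form with `tmp` prepended to the leading run.
theorem aRun_eq_span (fmts : List String) : ∀ (tmp : String),
    aRun tmp fmts =
      (if tmp ++ strJoin (fmts.takeWhile (fun x => !isDynFmt x)) = "" then []
       else [tmp ++ strJoin (fmts.takeWhile (fun x => !isDynFmt x))]) ++
        (match fmts.dropWhile (fun x => !isDynFmt x) with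
         | [] => []
         | d :: r => d :: join_fmts_py_alt r) := by
  induction fmts with
  | nil =>
    intro tmp
    by_cases ht : tmp = "" <;> simp [aRun, strJoin, ht]
  | cons f rest ih =>
    intro tmp
    by_cases hf : f = "y" ∨ f = "w"
    · have hd : isDynFmt f = true := by simp [isDynFmt, hf]
      simp only [aRun, hf, if_pos, List.takeWhile_cons, List.dropWhile_cons, hd,
        Bool.not_true, Bool.false_eq_true, if_false, strJoin_nil, String.append_empty]
      rw [ih ""]
      simp only [String.empty_append]
      rw [← alt_eq_span rest]
      by_cases ht : tmp = "" <;> simp [ht]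
    · have hd : isDynFmt f = false := by simp [isDynFmt, hf]
      simp only [aRun, hf, if_neg, not_false_iff, List.takeWhile_cons, List.dropWhile_cons,
        hd, Bool.not_false, if_pos]
      rw [ih (tmp ++ f)]
      simp [strJoin, String.append_assoc]

-- ===== VERDICT (by name: the statement is the Claim_ definition above) =====
theorem join_fmts_py_spec : Claim_equal_join_fmts_py := by
  intro fmts _
  unfold Spec_join_fmts_py join_fmts_py
  rw [foldl_eq_aRun fmts [] "", aRun_eq_span fmts ""]
  simp only [String.empty_append, List.nil_append]
  rw [← alt_eq_span]
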